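-- pv_equiv track=rewrite | github.com/jonwithers/turkish-song-nlp | scripts/post_scraping_text_processing.py | check_for_english
-- ===== SOURCE A (Python) =====
-- def check_for_english(text):
--     text_words = text.split(" ")
--     english_words = set(['I', "we're", "the", "an", "one", "to", "give", "love"])
--     counter = 0
--     for word in text_words:
--         if word in english_words:
--             counter += 1
--     return counter
-- ===== SOURCE B (Python) =====
-- def check_for_english(text):
--     english_words = set(['I', "we're", "the", "an", "one", "to", "give", "love"])
--     freq = {}
--     for word in text.split(" "):
--         freq[word] = freq.get(word, 0) + 1
--     total = 0
--     for word in english_words: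
--         total += freq.get(word, 0)
--     return total
-- ===== Notes on version B (the rewrite author's own statement) =====
-- stated objective: alternative
-- what changed: B builds a frequency table of all tokens once and then sums the counts of the eight fixed English words, instead of testing each token for set membership.
import Mathlib
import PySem

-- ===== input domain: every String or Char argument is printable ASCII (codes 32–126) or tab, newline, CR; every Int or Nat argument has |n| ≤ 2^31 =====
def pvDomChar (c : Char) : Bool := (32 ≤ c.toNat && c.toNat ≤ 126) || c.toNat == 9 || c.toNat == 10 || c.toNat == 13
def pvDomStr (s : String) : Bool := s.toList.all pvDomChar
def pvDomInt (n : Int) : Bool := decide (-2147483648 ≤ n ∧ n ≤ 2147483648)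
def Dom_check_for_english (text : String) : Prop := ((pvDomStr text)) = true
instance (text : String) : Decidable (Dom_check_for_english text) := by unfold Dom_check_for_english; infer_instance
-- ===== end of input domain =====

-- B builds a token frequency table once and sums the counts of the eight fixed English words,
-- instead of testing every token for set membership; alternative decomposition, same cost.


-- ===== PORT A =====
def check_for_english (text : String) : Int :=
  let text_words := (PySem.Str.split? text " ").getD []   -- sep is non-empty, split? is always some
  let english_words : PySem.Set String :=
    PySem.Set.ofList ["I", "we're", "the", "an", "one", "to", "give", "love"]
  text_words.foldl (fun counter word =>
    if PySem.Set.contains english_words word then counter + 1 else counter) 0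

-- ===== PORT B =====
def check_for_english_alt (text : String) : Int :=
  let english_words : PySem.Set String :=
    PySem.Set.ofList ["I", "we're", "the", "an", "one", "to", "give", "love"]
  let freq := ((PySem.Str.split? text " ").getD []).foldl
    (fun d word => d.insert word (d.getD word 0 + 1)) PySem.Dict.empty
  -- summing freq over the set: order-independent, iterate its element list
  english_words.foldl (fun total word => total + freq.getD word 0) 0

-- ===== PRECONDITION & SPEC =====
def Spec_check_for_english (text : String) (out : Int) : Prop := out = check_for_english_alt text
instance (text : String) (out : Int) : Decidable (Spec_check_for_english text out) := by unfold Spec_check_for_english; infer_instance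

-- ===== CLAIM (what is proved, stated in full; the proofs are below) =====
def Claim_equal_check_for_english : Prop := ∀ (text : String), Dom_check_for_english text → Spec_check_for_english text (check_for_english text)

-- ===== LEMMAS AND PROOFS =====

-- pushing one extra token through a sum of per-word counts over a duplicate-free word list
theorem sum_map_count_cons (t : String) (ts es : List String) (hse : es.Nodup) :
    (es.map (fun w => ((t :: ts).count w : Int))).sum =
      (es.map (fun w => (ts.count w : Int))).sum + (if es.contains t then 1 else 0) := by
  induction es with
  | nil => simp
  | cons e es ih =>
    have hnd := List.nodup_cons.mp hse
    simp only [List.map_cons, List.sum_cons, List.contains_cons, ih hnd.2]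
    by_cases he : t = e
    · subst he
      have hc : es.contains t = false := by
        simp [List.contains_eq_mem, hnd.1]
      simp [List.count_cons_self, hnd.1]
      ring
    · have hbe : (t == e) = false := by simp [he]
      rw [List.count_cons_of_ne he]
      simp only [hbe, Bool.false_or]
      ring

-- the membership-counting loop over the tokens equals the per-word count sum
theorem countP_mem_eq_sum_counts (toks : List String) (eng : List String) (h : eng.Nodup) :
    ((toks.countP (fun w => eng.contains w) : Int)) =
      (eng.map (fun w => (toks.count w : Int))).sum := by
  induction toks with
  | nil => simp
  | cons t ts ih =>
    rw [List.countP_cons, sum_map_count_cons t ts eng h, ← ih]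
    by_cases hm : eng.contains t
    · simp only [hm, if_true]
      push_cast
      ring
    · simp only [hm]
      push_cast
      ring

theorem check_for_english_equiv (text : String) :
    check_for_english text = check_for_english_alt text := by
  unfold check_for_english check_for_english_alt
  set toks := (PySem.Str.split? text " ").getD [] with htoks
  have heng : PySem.Set.ofList ["I", "we're", "the", "an", "one", "to", "give", "love"]
      = ["I", "we're", "the", "an", "one", "to", "give", "love"] := by decide
  simp only [heng]
  rw [PySem.List.foldl_if_add_one]
  rw [PySem.Dict.foldl_insert_getD_add_one_eq_counter]
  rw [PySem.List.foldl_add]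
  simp only [PySem.Dict.getD_counter]
  have hp : PySem.Set.contains ["I", "we're", "the", "an", "one", "to", "give", "love"]
      = (fun w => List.contains ["I", "we're", "the", "an", "one", "to", "give", "love"] w) := rfl
  rw [hp, countP_mem_eq_sum_counts toks _ (by decide)]

-- ===== VERDICT =====
theorem check_for_english_spec : Claim_equal_check_for_english := by
  intro text _
  unfold Spec_check_for_english
  exact check_for_english_equiv text
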